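-- pv_equiv track=rewrite | github.com/WERimagin/baseline_CoQA | prepro_seq2seq.py | c2wpointer
-- ===== SOURCE A (Python) =====
-- def c2wpointer(context_text,context,answer_start,answer_end):#answer_start,endをchara単位からword単位へ変換
--     #nltk.tokenizeを使って分割
--     #ダブルクオテーションがなぜか変化するので処理
--     token_id={}
--     cur_id=0
--     for i,token in enumerate(context):
--         start=context_text.find(token,cur_id)
--         token_id[i]=(start,start+len(token))
--         cur_id=start+len(token)
--     for i in range(len(token_id)):
--         if token_id[i][0]<=answer_start and answer_start<=token_id[i][1]:
--             answer_start_w=i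
--             break
--     for i in range(len(token_id)):
--         if token_id[i][0]<=answer_end and answer_end<=token_id[i][1]:
--             answer_end_w=i
--             break
--     return answer_start_w,answer_end_w
-- ===== SOURCE B (Python) =====
-- def c2wpointer(context_text, context, answer_start, answer_end):
--     # one pass: compute each token's char span and test both pointers on the fly
--     cur_id = 0
--     answer_start_w = None
--     answer_end_w = None
--     for i, token in enumerate(context):
--         start = context_text.find(token, cur_id)
--         end = start + len(token)
--         cur_id = end
--         if answer_start_w is None and start <= answer_start <= end:
--             answer_start_w = i
--         if answer_end_w is None and start <= answer_end <= end:
--             answer_end_w = i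
--     if answer_start_w is None or answer_end_w is None:
--         raise ValueError("answer span not aligned to tokens")
--     return answer_start_w, answer_end_w
-- ===== Notes on version B (the rewrite author's own statement) =====
-- stated objective: simpler
-- what changed: Replaces A's three sequential loops (build a token->span dict, then two separate first-match scans over range(len(dict))) by a single pass over enumerate(context) that computes each span and sets answer_start_w/answer_end_w at their first match, with no intermediate dict; B raises ValueError exactly where A raises UnboundLocalError (outside Pre_).
import Mathlib
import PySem

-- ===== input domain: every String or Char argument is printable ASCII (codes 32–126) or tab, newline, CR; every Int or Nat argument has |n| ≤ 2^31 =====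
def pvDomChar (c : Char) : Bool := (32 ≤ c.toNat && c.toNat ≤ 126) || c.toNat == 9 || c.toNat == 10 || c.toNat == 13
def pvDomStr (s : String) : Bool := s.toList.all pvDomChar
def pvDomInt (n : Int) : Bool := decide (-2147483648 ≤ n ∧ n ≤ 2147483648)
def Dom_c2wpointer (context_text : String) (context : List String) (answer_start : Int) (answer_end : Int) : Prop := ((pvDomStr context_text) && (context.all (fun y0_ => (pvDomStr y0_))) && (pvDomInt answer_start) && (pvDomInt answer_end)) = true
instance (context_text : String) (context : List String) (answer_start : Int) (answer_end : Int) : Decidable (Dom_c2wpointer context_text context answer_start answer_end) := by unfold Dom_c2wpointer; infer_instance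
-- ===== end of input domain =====

-- B merges A's three loops (span dict + two first-match scans) into one pass over the tokens; simpler, same result.
-- Pre_ excludes exactly the inputs where the Python A raises (UnboundLocalError: no token span contains a pointer); B raises ValueError there too.


-- ===== PORT A =====
-- the 'for i in range(len(token_id)): … break' early-exit scans, as structural recursion over the range list
def c2wpointerScan (token_id : PySem.Dict Int (Int × Int)) (target : Int) : List Int → Option Int
  | [] => none                         -- loop fell through: answer_*_w left unbound (UnboundLocalError; excluded by Pre_)
  | i :: rest =>
    match token_id.get? i with
    | none => none                     -- KeyError; unreachable: keys 0..n-1 are all present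
    | some t => if t.1 ≤ target ∧ target ≤ t.2 then some i else c2wpointerScan token_id target rest

def c2wpointer (context_text : String) (context : List String) (answer_start : Int) (answer_end : Int) : Int × Int :=
  -- for i,token in enumerate(context): start=context_text.find(token,cur_id); token_id[i]=(start,start+len(token)); cur_id=start+len(token)
  let st := (PySem.List.enumerate context).foldl
    (fun (acc : PySem.Dict Int (Int × Int) × Int) p =>
      let start := PySem.Str.findFrom context_text p.2 acc.2 none
      (acc.1.insert p.1 (start, start + (PySem.Str.len p.2 : Int)), start + (PySem.Str.len p.2 : Int)))
    (PySem.Dict.empty, 0)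
  let token_id := st.1
  let sw := c2wpointerScan token_id answer_start (PySem.List.pyRange 0 (PySem.Dict.size token_id) 1)
  let ew := c2wpointerScan token_id answer_end (PySem.List.pyRange 0 (PySem.Dict.size token_id) 1)
  (sw.getD 0, ew.getD 0)               -- none = Python raises at the return; excluded by Pre_

-- ===== PORT B =====
def c2wpointer_alt (context_text : String) (context : List String) (answer_start : Int) (answer_end : Int) : Int × Int :=
  -- single pass, state (cur_id, answer_start_w, answer_end_w)
  let st := (PySem.List.enumerate context).foldl
    (fun (acc : Int × Option Int × Option Int) p =>
      let start := PySem.Str.findFrom context_text p.2 acc.1 none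
      let stop := start + (PySem.Str.len p.2 : Int)
      let sw := if acc.2.1 = none ∧ start ≤ answer_start ∧ answer_start ≤ stop then some p.1 else acc.2.1
      let ew := if acc.2.2 = none ∧ start ≤ answer_end ∧ answer_end ≤ stop then some p.1 else acc.2.2
      (stop, sw, ew))
    (0, none, none)
  ((st.2.1).getD 0, (st.2.2).getD 0)   -- none = B raises ValueError; excluded by Pre_

-- ===== PRECONDITION & SPEC =====
-- the list of (start, end) char spans of the tokens, as both Pythons compute them
def pvSpansFrom (context_text : String) (cur : Int) : List String → List (Int × Int)
  | [] => []
  | t :: ts =>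
    let s := PySem.Str.findFrom context_text t cur none
    (s, s + (PySem.Str.len t : Int)) :: pvSpansFrom context_text (s + (PySem.Str.len t : Int)) ts

-- Pre_ excludes exactly the inputs on which Python A raises UnboundLocalError (some pointer is in no token span)
def Pre_c2wpointer (context_text : String) (context : List String) (answer_start : Int) (answer_end : Int) : Prop :=
  (∃ p ∈ pvSpansFrom context_text 0 context, p.1 ≤ answer_start ∧ answer_start ≤ p.2) ∧
  (∃ p ∈ pvSpansFrom context_text 0 context, p.1 ≤ answer_end ∧ answer_end ≤ p.2)
instance (context_text : String) (context : List String) (answer_start : Int) (answer_end : Int) : Decidable (Pre_c2wpointer context_text context answer_start answer_end) := by unfold Pre_c2wpointer; infer_instance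

def pvWitness_c2wpointer : String × List String × Int × Int := ("a b", ["a", "b"], 0, 2)

def Spec_c2wpointer (context_text : String) (context : List String) (answer_start : Int) (answer_end : Int) (out : Int × Int) : Prop := out = c2wpointer_alt context_text context answer_start answer_end
instance (context_text : String) (context : List String) (answer_start : Int) (answer_end : Int) (out : Int × Int) : Decidable (Spec_c2wpointer context_text context answer_start answer_end out) := by unfold Spec_c2wpointer; infer_instance

-- ===== CLAIM (what is proved, stated in full; the proofs are below) =====
def Claim_equal_c2wpointer : Prop := ∀ (context_text : String) (context : List String) (answer_start : Int) (answer_end : Int), Dom_c2wpointer context_text context answer_start answer_end → Pre_c2wpointer context_text context answer_start answer_end → Spec_c2wpointer context_text context answer_start answer_end (c2wpointer context_text context answer_start answer_end)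

-- ===== LEMMAS AND PROOFS =====
theorem comp_step (s0 : Option Int) (c : Prop) [Decidable c] (k : Int) (r : Option Int) :
    (if s0 = none ∧ c then some k else s0).or r = s0.or (if c then some k else r) := by
  cases s0 <;> split_ifs <;> simp_all [Option.or]

-- first index (counting from k) whose span contains target
def firstHit (target : Int) (k : Int) : List (Int × Int) → Option Int
  | [] => none
  | p :: rest => if p.1 ≤ target ∧ target ≤ p.2 then some k else firstHit target (k + 1) rest

-- cur_id after scanning the tokens
def curAfter (context_text : String) (cur : Int) : List String → Int
  | [] => cur
  | t :: ts => curAfter context_text (PySem.Str.findFrom context_text t cur none + (PySem.Str.len t : Int)) ts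

theorem altFold_eq (context_text : String) (answer_start answer_end : Int) :
    ∀ (ts : List String) (k cur : Int) (s0 e0 : Option Int),
    (PySem.List.enumerate ts k).foldl
      (fun (acc : Int × Option Int × Option Int) p =>
        let start := PySem.Str.findFrom context_text p.2 acc.1 none
        let stop := start + (PySem.Str.len p.2 : Int)
        let sw := if acc.2.1 = none ∧ start ≤ answer_start ∧ answer_start ≤ stop then some p.1 else acc.2.1
        let ew := if acc.2.2 = none ∧ start ≤ answer_end ∧ answer_end ≤ stop then some p.1 else acc.2.2
        (stop, sw, ew))
      (cur, s0, e0)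
    = (curAfter context_text cur ts,
       s0.or (firstHit answer_start k (pvSpansFrom context_text cur ts)),
       e0.or (firstHit answer_end k (pvSpansFrom context_text cur ts))) := by
  intro ts
  induction ts with
  | nil => intro k cur s0 e0; simp [PySem.List.enumerate_nil, pvSpansFrom, firstHit, curAfter]
  | cons t ts ih =>
    intro k cur s0 e0
    rw [PySem.List.enumerate_cons]
    simp only [List.foldl_cons]
    rw [ih]
    simp only [pvSpansFrom, curAfter, firstHit]
    simp only [comp_step]

theorem dictFold_get? (context_text : String) :
    ∀ (ts : List String) (k cur : Int) (d : PySem.Dict Int (Int × Int)) (j : Int),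
    (((PySem.List.enumerate ts k).foldl
      (fun (acc : PySem.Dict Int (Int × Int) × Int) p =>
        let start := PySem.Str.findFrom context_text p.2 acc.2 none
        (acc.1.insert p.1 (start, start + (PySem.Str.len p.2 : Int)), start + (PySem.Str.len p.2 : Int)))
      (d, cur)).1).get? j
    = if k ≤ j ∧ j < k + ts.length then (pvSpansFrom context_text cur ts)[(j - k).toNat]? else d.get? j := by
  intro ts
  induction ts with
  | nil =>
    intro k cur d j
    simp only [PySem.List.enumerate_nil, List.foldl_nil, pvSpansFrom, List.length_nil]
    rw [if_neg (by omega)]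
  | cons t ts ih =>
    intro k cur d j
    rw [PySem.List.enumerate_cons]
    simp only [List.foldl_cons]
    rw [ih]
    simp only [pvSpansFrom, List.length_cons]
    by_cases h1 : k + 1 ≤ j ∧ j < k + 1 + (ts.length : Int)
    · rw [if_pos h1, if_pos (by push_cast; omega)]
      have hj : (j - k).toNat = (j - (k + 1)).toNat + 1 := by omega
      rw [hj]
      simp
    · rw [if_neg h1]
      by_cases h2 : j = k
      · subst h2
        rw [PySem.Dict.get?_insert_self, if_pos (by push_cast; omega)]
        simp
      · rw [PySem.Dict.get?_insert_of_ne _ _ h2, if_neg (by push_cast; omega)]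

theorem dictFold_size (context_text : String) :
    ∀ (ts : List String) (k cur : Int) (d : PySem.Dict Int (Int × Int)),
    (∀ j : Int, k ≤ j → d.contains j = false) →
    PySem.Dict.size ((PySem.List.enumerate ts k).foldl
      (fun (acc : PySem.Dict Int (Int × Int) × Int) p =>
        let start := PySem.Str.findFrom context_text p.2 acc.2 none
        (acc.1.insert p.1 (start, start + (PySem.Str.len p.2 : Int)), start + (PySem.Str.len p.2 : Int)))
      (d, cur)).1
    = PySem.Dict.size d + ts.length := by
  intro ts
  induction ts with
  | nil => intro k cur d _h; simp [PySem.List.enumerate_nil]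
  | cons t ts ih =>
    intro k cur d h
    rw [PySem.List.enumerate_cons]
    simp only [List.foldl_cons]
    rw [ih (k + 1) _ _ (fun j hj => by
      rw [PySem.Dict.contains_insert]
      simp only [Bool.or_eq_false_iff]
      refine ⟨by simp; omega, h j (by omega)⟩)]
    rw [PySem.Dict.size_insert, if_neg (by simp [h k (le_refl k)])]
    simp only [List.length_cons]
    omega

theorem scan_eq_firstHit (d : PySem.Dict Int (Int × Int)) (target : Int) :
    ∀ (spans : List (Int × Int)) (k n : Int),
    n = k + spans.length →
    (∀ j : Int, k ≤ j → j < n → d.get? j = spans[(j - k).toNat]?) →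
    c2wpointerScan d target (PySem.List.pyRange k n 1) = firstHit target k spans := by
  intro spans
  induction spans with
  | nil =>
    intro k n h1 _h2
    rw [PySem.List.pyRange_one_eq_nil (by simp at h1; omega)]
    simp [c2wpointerScan, firstHit]
  | cons p rest ih =>
    intro k n h1 h2
    rw [PySem.List.pyRange_one_cons (by simp at h1; omega)]
    have e : d.get? k = some p := by
      rw [h2 k le_rfl (by simp at h1; omega)]
      simp
    simp only [c2wpointerScan, e, firstHit]
    split_ifs with h
    · rfl
    · exact ih (k + 1) n (by simp at h1 ⊢; omega) (fun j hj1 hj2 => by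
        rw [h2 j (by omega) hj2]
        rw [show (j - k).toNat = (j - (k + 1)).toNat + 1 by omega]
        simp)

theorem pvSpansFrom_length (context_text : String) :
    ∀ (ts : List String) (cur : Int), (pvSpansFrom context_text cur ts).length = ts.length := by
  intro ts
  induction ts with
  | nil => intro cur; rfl
  | cons t ts ih => intro cur; simp [pvSpansFrom, ih]

-- ===== VERDICT (by name: the statement is the Claim_ definition above) =====
theorem c2wpointer_spec : Claim_equal_c2wpointer := by
  intro context_text context answer_start answer_end _hD _hP
  unfold Spec_c2wpointer c2wpointer c2wpointer_alt
  rw [altFold_eq]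
  dsimp only
  have hsize := dictFold_size context_text context 0 0 PySem.Dict.empty
      (fun j _ => by simp [PySem.Dict.contains_empty])
  rw [PySem.Dict.size_empty] at hsize
  have hget := dictFold_get? context_text context 0 0 PySem.Dict.empty
  have hlen := pvSpansFrom_length context_text context 0
  dsimp only at hsize hget
  have hj : ∀ j : Int, 0 ≤ j → j < ((0 + context.length : Nat) : Int) →
      (((PySem.List.enumerate context 0).foldl
        (fun (acc : PySem.Dict Int (Int × Int) × Int) p =>
          let start := PySem.Str.findFrom context_text p.2 acc.2 none
          (acc.1.insert p.1 (start, start + (PySem.Str.len p.2 : Int)), start + (PySem.Str.len p.2 : Int)))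
        (PySem.Dict.empty, 0)).1).get? j = (pvSpansFrom context_text 0 context)[(j - 0).toNat]? := by
    intro j h0 h1
    rw [hget j, if_pos (by push_cast at h1; constructor <;> omega)]
  dsimp only at hj
  rw [hsize]
  rw [scan_eq_firstHit _ answer_start (pvSpansFrom context_text 0 context) 0
        ((0 + context.length : Nat) : Int) (by rw [hlen]; push_cast; omega) hj,
      scan_eq_firstHit _ answer_end (pvSpansFrom context_text 0 context) 0
        ((0 + context.length : Nat) : Int) (by rw [hlen]; push_cast; omega) hj]
  simp [Option.or]
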